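-- pv_equiv track=rewrite | github.com/mitchellshahen/earthdaily-interview | earthdaily_sols.py | list_manip
-- ===== SOURCE A (Python) =====
-- def list_manip(original_list, add_list, delete_list):
--     """
--     Function to manipulate a list of strings.
--
--     :param original_list: A list of strings to be manipulated
--     :param add_list: A list of strings to be added to the original
--     :param delete_list: A list of strings to be deleted from the original
--     :returns: A list containing strings from the original list and the
--     added list with no duplications and with strings of the same length
--     ordered in reverse alphabetical order
--     """
--
--     # add the add list to the original list one element at a time
--     for element in add_list:
--         if element not in original_list:
--             original_list.append(element)
--
--     # delete the elements in the delete list from the above list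
--     for element in delete_list:
--         if element in original_list:
--             original_list.remove(element)
--
--     # create a dictionary of keys (string lengths)
--     # and values (strings of that length)
--     elem_dict = {}
--     for element in original_list:
--         elem_len = len(element)
--         if elem_len not in elem_dict.keys():
--             elem_dict[elem_len] = []
--         elem_dict[elem_len].append(element)
--
--     # sort each dictionary value list alphabetically in reverse
--     for elem_list in elem_dict.values():
--         if len(elem_list) > 1:
--             elem_list.sort(reverse=True)
--
--     # sort the dictionary keys by number in reverse
--     dict_key_list = sorted(list(elem_dict.keys()), reverse=True)
--
--     # unpack the dictionary adding each value list to a final list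
--     # starting with the longest strings and keeping the order
--     # of each value list
--     final_list = []
--     for key in dict_key_list:
--         elem_list = elem_dict[key]
--         for element in elem_list:
--             final_list.append(element)
--
--     return final_list
-- ===== SOURCE B (Python) =====
-- def list_manip(original_list, add_list, delete_list):
--     # NOTE: like A, this mutates original_list in place (the add/delete loops);
--     # the grouping/sorting block is replaced by one sorted() with a composite key.
--     for element in add_list:
--         if element not in original_list:
--             original_list.append(element)
--     for element in delete_list:
--         if element in original_list:
--             original_list.remove(element)
--     return sorted(original_list, key=lambda s: (len(s), s), reverse=True)
-- ===== Notes on version B (the rewrite author's own statement) =====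
-- stated objective: simpler
-- what changed: The dict-grouping by length, per-bucket reverse sort, key sort and unpacking loop are replaced by a single stable sorted() call with the composite key (len(s), s) and reverse=True; the mutating add/delete merge loops are kept.
import Mathlib
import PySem

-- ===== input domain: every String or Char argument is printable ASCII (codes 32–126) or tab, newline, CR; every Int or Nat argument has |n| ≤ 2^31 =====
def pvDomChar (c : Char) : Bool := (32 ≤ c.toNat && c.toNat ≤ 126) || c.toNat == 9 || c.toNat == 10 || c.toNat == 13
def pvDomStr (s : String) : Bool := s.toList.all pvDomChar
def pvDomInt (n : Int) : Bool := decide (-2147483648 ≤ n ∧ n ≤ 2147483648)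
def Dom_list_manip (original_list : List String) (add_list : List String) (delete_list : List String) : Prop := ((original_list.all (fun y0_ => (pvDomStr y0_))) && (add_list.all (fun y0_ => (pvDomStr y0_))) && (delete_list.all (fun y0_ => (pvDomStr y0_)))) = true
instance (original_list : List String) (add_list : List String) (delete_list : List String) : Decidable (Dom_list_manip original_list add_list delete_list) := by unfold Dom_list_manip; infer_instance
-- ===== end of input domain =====

-- B replaces A's dict-grouping / per-bucket sort / key-sort / unpack block by ONE stable sort
-- with composite key (len(s), s), reverse=True; equivalence is about the RETURN value only
-- (both Pythons mutate original_list identically via the add/delete loops).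

-- ===== PORT A =====
def list_manip (original_list : List String) (add_list : List String) (delete_list : List String) : List String :=
  -- for element in add_list: if element not in original_list: original_list.append(element)
  let l1 := add_list.foldl (fun acc e => if e ∈ acc then acc else acc ++ [e]) original_list
  -- for element in delete_list: if element in original_list: original_list.remove(element)
  let l2 := delete_list.foldl (fun acc e => if e ∈ acc then (PySem.List.remove? acc e).getD acc else acc) l1
  -- elem_dict = {}; for element: if elem_len not in keys: [] ; elem_dict[elem_len].append(element)
  let elem_dict := l2.foldl (fun d e =>
      let n := PySem.Str.len e
      let d := if n ∈ d.keys then d else d.insert n []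
      d.modify n [] (fun l => l ++ [e])) PySem.Dict.empty
  -- for elem_list in elem_dict.values(): if len(elem_list) > 1: elem_list.sort(reverse=True)
  let elem_dict2 := PySem.Dict.mk (elem_dict.items.map (fun p =>
      (p.1, if 1 < PySem.List.len p.2 then PySem.List.sorted p.2 (fun x => x) true else p.2)))
  -- dict_key_list = sorted(list(elem_dict.keys()), reverse=True)
  let dict_key_list := PySem.List.sorted elem_dict2.keys (fun x => x) true
  -- final_list = []; for key: for element in elem_dict[key]: final_list.append(element)
  dict_key_list.foldl (fun final k =>
      (elem_dict2.getD k []).foldl (fun fl e => fl ++ [e]) final) []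

-- ===== PORT B =====
def list_manip_alt (original_list : List String) (add_list : List String) (delete_list : List String) : List String :=
  let l1 := add_list.foldl (fun acc e => if e ∈ acc then acc else acc ++ [e]) original_list
  let l2 := delete_list.foldl (fun acc e => if e ∈ acc then (PySem.List.remove? acc e).getD acc else acc) l1
  -- return sorted(l2, key=lambda s: (len(s), s), reverse=True)
  PySem.List.sorted2 l2 (fun s => PySem.Str.len s) (fun s => s) true

-- ===== PRECONDITION & SPEC =====
def Spec_list_manip (original_list : List String) (add_list : List String) (delete_list : List String) (out : List String) : Prop := out = list_manip_alt original_list add_list delete_list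
instance (original_list : List String) (add_list : List String) (delete_list : List String) (out : List String) : Decidable (Spec_list_manip original_list add_list delete_list out) := by unfold Spec_list_manip; infer_instance

-- ===== CLAIM (what is proved, stated in full; the proofs are below) =====
def Claim_equal_list_manip : Prop := ∀ (original_list : List String) (add_list : List String) (delete_list : List String), Dom_list_manip original_list add_list delete_list → Spec_list_manip original_list add_list delete_list (list_manip original_list add_list delete_list)

-- ===== LEMMAS AND PROOFS =====

-- the strict "before" test sorted2 uses for key (len s, s), reverse=True: ltB a b ↔ (len a, a) <lex (len b, b)
def ltB (a b : String) : Bool :=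
  decide (PySem.Str.len a < PySem.Str.len b) || (!decide (PySem.Str.len b < PySem.Str.len a) && decide (a < b))

theorem ltB_iff (a b : String) : ltB a b = true ↔
    (PySem.Str.len a < PySem.Str.len b ∨ (PySem.Str.len a = PySem.Str.len b ∧ a < b)) := by
  simp only [ltB, Bool.or_eq_true, Bool.and_eq_true, Bool.not_eq_true', decide_eq_true_eq,
    decide_eq_false_iff_not]
  constructor
  · rintro (h | ⟨h1, h2⟩)
    · exact Or.inl h
    · rcases lt_or_eq_of_le (not_lt.mp h1) with h | h
      · exact Or.inl h
      · exact Or.inr ⟨h, h2⟩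
  · rintro (h | ⟨h1, h2⟩)
    · exact Or.inl h
    · exact Or.inr ⟨not_lt.mpr (le_of_eq h1), h2⟩

theorem ltB_trans (a b c : String) : ltB a b = true → ltB b c = true → ltB a c = true := by
  rw [ltB_iff, ltB_iff, ltB_iff]
  rintro (h | ⟨h1, h2⟩) (h' | ⟨h1', h2'⟩)
  · exact Or.inl (lt_trans h h')
  · exact Or.inl (h1' ▸ h)
  · exact Or.inl (h1 ▸ h')
  · exact Or.inr ⟨h1.trans h1', lt_trans h2 h2'⟩

theorem ltB_asymm (a b : String) : ltB a b = true → ltB b a = false := by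
  intro h
  rw [Bool.eq_false_iff]
  intro hc
  rw [ltB_iff] at h hc
  rcases h with h | ⟨h1, h2⟩ <;> rcases hc with h' | ⟨h1', h2'⟩
  · exact absurd h' (not_lt.mpr (le_of_lt h))
  · exact absurd h (by rw [h1']; exact lt_irrefl _)
  · exact absurd h' (by rw [h1]; exact lt_irrefl _)
  · exact absurd h2' (not_lt.mpr (le_of_lt h2))

theorem ltB_total (a b : String) (h1 : ltB a b = false) (h2 : ltB b a = false) : a = b := by
  rw [Bool.eq_false_iff] at h1 h2
  by_contra hne
  rcases lt_trichotomy (PySem.Str.len a) (PySem.Str.len b) with h | h | h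
  · exact h1 (by rw [ltB_iff]; exact Or.inl h)
  · rcases lt_or_gt_of_ne hne with hs | hs
    · exact h1 (by rw [ltB_iff]; exact Or.inr ⟨h, hs⟩)
    · exact h2 (by rw [ltB_iff]; exact Or.inr ⟨h.symm, hs⟩)
  · exact h2 (by rw [ltB_iff]; exact Or.inl h)

-- descending ordering relation both ports' outputs satisfy
def rB (a b : String) : Prop := ltB a b = false

-- insertion into an rB-descending list keeps it descending (insertion-sort invariant for ltB)
theorem insertBy_pairwise_rB (x : String) (ys : List String)
    (h : ys.Pairwise rB) :
    (PySem.List.insertBy (fun a b => ltB b a) x ys).Pairwise rB := by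
  induction ys with
  | nil => rw [PySem.List.insertBy.eq_1]; exact List.pairwise_singleton _ _
  | cons y ys ih =>
    rw [List.pairwise_cons] at h
    rw [PySem.List.insertBy.eq_2]
    by_cases hx : ltB y x = true
    · rw [if_pos hx]
      refine List.Pairwise.cons ?_ (List.Pairwise.cons h.1 h.2)
      intro z hz
      rcases List.mem_cons.mp hz with rfl | hz
      · exact ltB_asymm _ x hx
      · have hzy : ltB y z = false := h.1 z hz
        show ltB x z = false
        rw [Bool.eq_false_iff]
        intro hc
        exact absurd (ltB_trans y x z hx hc) (by simp [hzy])
    · rw [Bool.not_eq_true] at hx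
      rw [if_neg (by simp [hx])]
      refine List.Pairwise.cons ?_ (ih h.2)
      intro z hz
      rcases (PySem.List.mem_insertBy _ x z ys).mp hz with rfl | hz
      · exact hx
      · exact h.1 z hz

theorem foldl_insertBy_pairwise_rB (xs acc : List String) (hacc : acc.Pairwise rB) :
    (xs.foldl (fun acc x => PySem.List.insertBy (fun a b => ltB b a) x acc) acc).Pairwise rB := by
  induction xs generalizing acc with
  | nil => exact hacc
  | cons x xs ih => exact ih _ (insertBy_pairwise_rB x acc hacc)

theorem sorted2_eq_foldl (M : List String) :
    PySem.List.sorted2 M (fun s => PySem.Str.len s) (fun s => s) true =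
      M.foldl (fun acc x => PySem.List.insertBy (fun a b => ltB b a) x acc) [] := rfl

-- A-side: the literal "ensure key, then append" dict step is one Python d[k]-assignment (modify)
theorem dict_step_eq (d : PySem.Dict Int (List String)) (n : Int) (f : List String → List String) :
    PySem.Dict.modify (if n ∈ d.keys then d else d.insert n []) n [] f = d.modify n [] f := by
  by_cases h : n ∈ d.keys
  · rw [if_pos h]
  · rw [if_neg h]
    have hc : d.contains n = false := by
      rw [← Bool.not_eq_true]
      exact fun hh => h ((PySem.Dict.contains_iff_mem_keys d n).mp hh)
    unfold PySem.Dict.modify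
    rw [PySem.Dict.getD_insert_self, PySem.Dict.insert_insert_self,
      PySem.Dict.getD_of_not_contains d [] hc]

-- the grouping dict looked up at c is exactly the length-c sublist of M, in order
theorem bucket_eq (M : List String) (c : Int) :
    (M.foldl (fun d e => d.modify (PySem.Str.len e) [] (fun l => l ++ [e]))
        PySem.Dict.empty).getD c []
      = M.filter (fun e => PySem.Str.len e == c) := by
  have h := PySem.Dict.getD_foldl_modify_append (M.map (fun e => (PySem.Str.len e, e)))
      PySem.Dict.empty c
  rw [List.foldl_map] at h
  rw [List.filter_map] at h
  simpa [Function.comp_def] using h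

theorem keys_dA (M : List String) :
    (M.foldl (fun d e => d.modify (PySem.Str.len e) [] (fun l => l ++ [e]))
        PySem.Dict.empty).keys = PySem.Set.ofList (M.map PySem.Str.len) := by
  have h := PySem.Dict.keys_foldl_modify_key M (fun e => PySem.Str.len e) []
      (fun _ e => fun l => l ++ [e]) PySem.Dict.empty
  exact h

theorem nodup_keys_dA (M : List String) :
    (M.foldl (fun d e => d.modify (PySem.Str.len e) [] (fun l => l ++ [e]))
        PySem.Dict.empty).keys.Nodup :=
  PySem.Dict.nodup_keys_foldl_modify_key M (fun e => PySem.Str.len e) []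
    (fun _ e => fun l => l ++ [e]) PySem.Dict.empty PySem.Dict.nodup_keys_empty

-- distinct buckets covering all of M concatenate to a permutation of M
theorem flatMap_filter_perm (ks : List Int) (M : List String)
    (hnd : ks.Nodup) (hcov : ∀ e ∈ M, PySem.Str.len e ∈ ks) :
    (ks.flatMap (fun c => M.filter (fun e => PySem.Str.len e == c))).Perm M := by
  induction ks generalizing M with
  | nil =>
    cases M with
    | nil => simp
    | cons e M => exact absurd (hcov e (by simp)) (by simp)
  | cons c ks ih =>
    rw [List.flatMap_cons]
    have hne : ∀ c' ∈ ks, c' ≠ c := by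
      intro c' hc' hEq
      exact (List.nodup_cons.mp hnd).1 (hEq ▸ hc')
    have hrest : ∀ c' ∈ ks,
        M.filter (fun e => PySem.Str.len e == c')
          = (M.filter (fun e => !(PySem.Str.len e == c))).filter (fun e => PySem.Str.len e == c') := by
      intro c' hc'
      rw [List.filter_filter]
      apply List.filter_congr
      intro e _
      by_cases h1 : PySem.Str.len e = c'
      · have h2 : PySem.Str.len e ≠ c := h1 ▸ hne c' hc'
        rw [beq_iff_eq.mpr h1, beq_eq_false_iff_ne.mpr h2]
        rfl
      · rw [beq_eq_false_iff_ne.mpr h1]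
        rfl
    have hmapeq : ks.flatMap (fun c' => M.filter (fun e => PySem.Str.len e == c'))
        = ks.flatMap (fun c' => (M.filter (fun e => !(PySem.Str.len e == c))).filter
            (fun e => PySem.Str.len e == c')) := by
      rw [List.flatMap_def, List.flatMap_def, List.map_congr_left hrest]
    rw [hmapeq]
    have hcov' : ∀ e ∈ M.filter (fun e => !(PySem.Str.len e == c)), PySem.Str.len e ∈ ks := by
      intro e he
      rw [List.mem_filter] at he
      have := hcov e he.1
      rcases List.mem_cons.mp this with h | h
      · exact absurd (beq_iff_eq.mpr h) (by simpa using he.2)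
      · exact h
    have hperm := ih (M.filter (fun e => !(PySem.Str.len e == c))) (List.nodup_cons.mp hnd).2 hcov'
    exact List.Perm.trans (List.Perm.append_left _ hperm)
      (List.filter_append_perm (fun e => PySem.Str.len e == c) M)

-- A's per-bucket in-place sort (only when len > 1) as a value function
def sortIf (l : List String) : List String :=
  if 1 < PySem.List.len l then PySem.List.sorted l (fun x => x) true else l

theorem sortIf_perm (l : List String) : (sortIf l).Perm l := by
  unfold sortIf
  split
  · exact PySem.List.sorted_perm l (fun x => x) true
  · exact List.Perm.refl l

theorem mem_sortIf (l : List String) (x : String) (h : x ∈ sortIf l) : x ∈ l := by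
  unfold sortIf at h
  split at h
  · exact (PySem.List.mem_sorted l (fun x => x) true x).mp h
  · exact h

theorem sortIf_pairwise_le (l : List String) : (sortIf l).Pairwise (fun a b => b ≤ a) := by
  unfold sortIf
  split
  · exact PySem.List.sorted_pairwise_rev l (fun x => x)
  · rename_i h
    rcases l with _ | ⟨x, _ | ⟨y, t⟩⟩
    · exact List.Pairwise.nil
    · exact List.pairwise_singleton _ _
    · exact absurd (by simp [PySem.List.len]) h

-- the heart of the proof: A's group-by-length / sort-buckets / sort-keys / concatenate
-- pipeline equals one stable sort by the composite key (len s, s), reverse=True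
def dictA (M : List String) : PySem.Dict Int (List String) :=
  M.foldl (fun d e =>
    PySem.Dict.modify (if PySem.Str.len e ∈ d.keys then d else d.insert (PySem.Str.len e) [])
      (PySem.Str.len e) [] (fun l => l ++ [e])) PySem.Dict.empty

def dict2A (M : List String) : PySem.Dict Int (List String) :=
  PySem.Dict.mk ((dictA M).items.map (fun p =>
    (p.1, if 1 < PySem.List.len p.2 then PySem.List.sorted p.2 (fun x => x) true else p.2)))

theorem main_eq (M : List String) :
    (PySem.List.sorted (dict2A M).keys (fun x => x) true).foldl
      (fun final k => ((dict2A M).getD k []).foldl (fun fl e => fl ++ [e]) final) []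
    = PySem.List.sorted2 M (fun s => PySem.Str.len s) (fun s => s) true := by
  unfold dict2A dictA
  -- collapse the literal dict step to a single modify
  have hstep : (fun (d : PySem.Dict Int (List String)) (e : String) =>
      PySem.Dict.modify (if PySem.Str.len e ∈ d.keys then d else d.insert (PySem.Str.len e) [])
        (PySem.Str.len e) [] (fun l => l ++ [e]))
      = fun d e => d.modify (PySem.Str.len e) [] (fun l => l ++ [e]) :=
    funext fun d => funext fun e => dict_step_eq d (PySem.Str.len e) (fun l => l ++ [e])
  rw [hstep]
  set D := M.foldl (fun d e => d.modify (PySem.Str.len e) [] (fun l => l ++ [e]))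
      PySem.Dict.empty with hD
  set D2 := PySem.Dict.mk (D.items.map (fun p =>
      (p.1, if 1 < PySem.List.len p.2 then PySem.List.sorted p.2 (fun x => x) true else p.2))) with hD2
  have hndD : D.keys.Nodup := nodup_keys_dA M
  have hkeys2 : D2.keys = D.keys := by
    rw [hD2, PySem.Dict.keys_mk, List.map_map]
    rfl
  have hget2 : ∀ k ∈ D.keys, D2.getD k [] = sortIf (D.getD k []) := by
    intro k hk
    obtain ⟨v, hv⟩ : ∃ v, D.get? k = some v := by
      cases h : D.get? k with
      | none => exact absurd hk ((PySem.Dict.get?_eq_none_iff_not_mem_keys D k).mp h)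
      | some v => exact ⟨v, rfl⟩
    have hmem : (k, v) ∈ D.items := (PySem.Dict.get?_eq_some_iff_mem_items D k v hndD).mp hv
    have hmem2 : (k, sortIf v) ∈ D2.items := by
      rw [hD2]
      exact List.mem_map.mpr ⟨(k, v), hmem, rfl⟩
    rw [PySem.Dict.getD_of_mem_items D2 hmem2 (by rw [hkeys2]; exact hndD) [],
      PySem.Dict.getD_of_get?_eq_some D [] hv]
  -- the unpacking loops are one flatMap
  have hinner : (fun (final : List String) (k : Int) =>
      (D2.getD k []).foldl (fun fl e => fl ++ [e]) final)
      = fun final k => final ++ D2.getD k [] :=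
    funext fun final => funext fun k => PySem.List.foldl_append_singleton _ final
  rw [hkeys2, hinner, PySem.List.foldl_append_eq_flatMap, List.nil_append]
  set ks := PySem.List.sorted D.keys (fun x => x) true with hks
  have hksperm : ks.Perm D.keys := PySem.List.sorted_perm _ _ _
  have hksnd : ks.Nodup := hksperm.nodup_iff.mpr hndD
  have hmemks : ∀ e ∈ M, PySem.Str.len e ∈ ks := by
    intro e he
    rw [hks, PySem.List.mem_sorted, keys_dA M,
      PySem.Set.mem_ofList]
    exact List.mem_map.mpr ⟨e, he, rfl⟩
  have hbucketD2 : ∀ k ∈ ks, D2.getD k [] = sortIf (M.filter (fun e => PySem.Str.len e == k)) := by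
    intro k hk
    rw [hget2 k (hksperm.mem_iff.mp hk), hD, bucket_eq]
  -- LHS is a permutation of M
  have hpermL : (ks.flatMap (fun k => D2.getD k [])).Perm M := by
    have h1 : (ks.flatMap (fun k => D2.getD k [])).Perm
        (ks.flatMap (fun k => M.filter (fun e => PySem.Str.len e == k))) := by
      apply List.Perm.flatMap_left
      intro k hk
      rw [hbucketD2 k hk]
      exact sortIf_perm _
    exact h1.trans (flatMap_filter_perm ks M hksnd hmemks)
  -- LHS is rB-descending
  have hlen_of_mem : ∀ (k : Int), ∀ x ∈ sortIf (M.filter (fun e => PySem.Str.len e == k)),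
      PySem.Str.len x = k := by
    intro k x hx
    have := mem_sortIf _ _ hx
    rw [List.mem_filter] at this
    exact beq_iff_eq.mp this.2
  have hpwL : (ks.flatMap (fun k => D2.getD k [])).Pairwise rB := by
    rw [List.pairwise_flatMap]
    constructor
    · intro k hk
      rw [hbucketD2 k hk]
      apply (sortIf_pairwise_le _).imp_of_mem
      intro a b ha hb hle
      show ltB a b = false
      rw [Bool.eq_false_iff]
      intro hlt
      rw [ltB_iff] at hlt
      have hla := hlen_of_mem k a ha
      have hlb := hlen_of_mem k b hb
      rcases hlt with h | ⟨_, h⟩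
      · rw [hla, hlb] at h
        exact lt_irrefl _ h
      · exact absurd h (not_lt.mpr hle)
    · have hksle : ks.Pairwise (fun a b => (b : Int) ≤ a) := by
        have := PySem.List.sorted_pairwise_rev D.keys (fun x : Int => x)
        rw [← hks] at this
        exact this
      have hkslt : ks.Pairwise (fun a b => (b : Int) < a) := by
        apply (hksle.and hksnd).imp
        intro a b hab
        exact lt_of_le_of_ne hab.1 (Ne.symm hab.2)
      apply hkslt.imp_of_mem
      intro k k' hk hk' hkk x hx y hy
      rw [hbucketD2 k hk] at hx
      rw [hbucketD2 k' hk'] at hy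
      show ltB x y = false
      rw [Bool.eq_false_iff]
      intro hlt
      rw [ltB_iff] at hlt
      have hlx := hlen_of_mem k x hx
      have hly := hlen_of_mem k' y hy
      rcases hlt with h | ⟨h, _⟩
      · rw [hlx, hly] at h
        exact lt_irrefl _ (h.trans hkk)
      · rw [hlx, hly] at h
        exact lt_irrefl _ (h ▸ hkk)
    -- RHS: the sorted2 call is the insertion-sort fold
  rw [sorted2_eq_foldl]
  have hpermR : (M.foldl (fun acc x => PySem.List.insertBy (fun a b => ltB b a) x acc) []).Perm M := by
    simpa using PySem.List.foldl_insertBy_perm (fun a b => ltB b a) M []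
  have hpwR := foldl_insertBy_pairwise_rB M [] List.Pairwise.nil
  exact List.Perm.eq_of_pairwise
    (fun a b _ _ hab hba => ltB_total a b hab hba)
    hpwL hpwR (hpermL.trans hpermR.symm)

-- ===== VERDICT (by name: the statement is the Claim_ definition above) =====
theorem list_manip_spec : Claim_equal_list_manip := by
  intro original_list add_list delete_list _
  show list_manip original_list add_list delete_list
      = list_manip_alt original_list add_list delete_list
  exact main_eq (delete_list.foldl
    (fun acc e => if e ∈ acc then (PySem.List.remove? acc e).getD acc else acc)
    (add_list.foldl (fun acc e => if e ∈ acc then acc else acc ++ [e]) original_list))
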